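-- pv_equiv track=rewrite | github.com/dmaman86/algo-solutions | problems/graphs/airport_connections/python/airport_connections.py | airport_connections
-- ===== SOURCE A (Python) =====
-- from collections import defaultdict, deque
--
-- def topo_sort_util(
--     adj: dict[str, list[str]], v: str, visited: set[str], stack: deque
-- ) -> None:
--     visited.add(v)
--
--     for i in adj[v]:
--         if i not in visited:
--             topo_sort_util(adj, i, visited, stack)
--
--     stack.append(v)
--
-- def topo_sort(adj: dict[str, list[str]], airports: list[str]) -> deque:
--     visited: set[str] = set()
--     stack = deque()
--
--     for airport in airports:
--         if airport not in visited:
--             topo_sort_util(adj, airport, visited, stack)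
--
--     return stack
--
-- def dfs(adj: dict[str, list[str]], v: str, visited: set[str]) -> None:
--     visited.add(v)
--
--     for i in adj[v]:
--         if i not in visited:
--             dfs(adj, i, visited)
--
-- def airport_connections(
--     airports: list[str], routes: list[list[str]], starting_airport: str
-- ) -> list[tuple[str, str]]:
--     # idmp = {airport: idx for idx, airport in enumerate(airports)}
--     # adj = defaultdict(list)
--     adj: dict[str, list[str]] = defaultdict(list)
--
--     for route in routes:
--         u, v = route
--         adj[u].append(v)
--
--     stack: deque[str] = topo_sort(adj, airports)
--     visited: set[str] = set()
--     dfs(adj, starting_airport, visited)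
--
--     new_connections: list[tuple[str, str]] = []
--
--     while stack:
--         u = stack.pop()
--         if u not in visited:
--             new_connections.append((starting_airport, u))
--             dfs(adj, u, visited)
--
--     return new_connections
-- ===== SOURCE B (Python) =====
-- def _dfs_engine(adj, root, visited, order):
--     # iterative post-order DFS with an explicit frame stack; marks nodes on first
--     # encounter (root before the loop, children at push time) and appends each node
--     # to `order` once its whole subtree is finished -- the recursive post-order.
--     visited.add(root)
--     frames = [(root, adj.get(root, []))]
--     while frames:
--         v, pending = frames.pop()
--         if pending:
--             c, rest = pending[0], pending[1:]
--             frames.append((v, rest))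
--             if c not in visited:
--                 visited.add(c)
--                 frames.append((c, adj.get(c, [])))
--         else:
--             order.append(v)
--
--
-- def airport_connections(airports, routes, starting_airport):
--     adj = {}
--     for u, v in routes:
--         adj.setdefault(u, []).append(v)
--
--     order = []
--     seen = set()
--     for a in airports:
--         if a not in seen:
--             _dfs_engine(adj, a, seen, order)
--
--     visited = set()
--     _dfs_engine(adj, starting_airport, visited, [])
--
--     result = []
--     for u in reversed(order):
--         if u not in visited:
--             result.append((starting_airport, u))
--             _dfs_engine(adj, u, visited, [])
--     return result
-- ===== Notes on version B (the rewrite author's own statement) =====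
-- stated objective: alternative
-- what changed: Replaces the two recursive DFS helpers with a single explicit-stack iterative post-order DFS engine (frames of node + pending children) used for both the topological ordering and the reachability passes, iterating reversed(order) instead of popping a deque.
import Mathlib
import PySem

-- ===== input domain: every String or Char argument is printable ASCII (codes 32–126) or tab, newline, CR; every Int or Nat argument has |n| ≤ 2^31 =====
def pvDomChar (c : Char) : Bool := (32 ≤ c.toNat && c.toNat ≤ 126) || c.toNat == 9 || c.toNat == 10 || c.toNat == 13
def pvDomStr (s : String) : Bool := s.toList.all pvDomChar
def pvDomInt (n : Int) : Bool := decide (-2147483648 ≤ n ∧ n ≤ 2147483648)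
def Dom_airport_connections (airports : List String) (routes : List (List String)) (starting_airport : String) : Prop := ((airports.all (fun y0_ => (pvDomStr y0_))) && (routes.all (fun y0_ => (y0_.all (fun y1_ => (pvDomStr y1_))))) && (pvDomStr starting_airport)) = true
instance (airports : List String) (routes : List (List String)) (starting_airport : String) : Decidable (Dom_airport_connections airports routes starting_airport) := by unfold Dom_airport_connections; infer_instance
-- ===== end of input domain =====

-- B replaces A's two recursive DFS helpers by one explicit-stack iterative post-order
-- DFS engine (objective: alternative decomposition, same output).

-- ===== PORT A =====
-- The recursive helpers carry a recursion-depth fuel (first Nat argument) purely to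
-- make the recursion structural; the top level passes a fuel larger than any possible
-- DFS depth, so the fuel-exhaustion branches are never taken on actual inputs.
def pvAdjA (routes : List (List String)) : PySem.Dict String (List String) :=
  routes.foldl (fun d r =>
    match r with
    | [u, v] => d.insert u (d.getD u [] ++ [v])   -- adj[u].append(v) on defaultdict(list)
    | _ => d) PySem.Dict.empty                    -- other lengths raise ValueError: outside Pre_

mutual
def pvTopoUtilA (adj : PySem.Dict String (List String)) :
    Nat → String → PySem.Set String → List String → PySem.Set String × List String
  | 0, _, vis, out => (vis, out)
  | f + 1, v, vis, out =>
      let p := pvTopoChildA adj f (adj.getD v []) (PySem.Set.add vis v) out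
      (p.1, p.2 ++ [v])
  termination_by f _ _ _ => (f, 0)

def pvTopoChildA (adj : PySem.Dict String (List String)) :
    Nat → List String → PySem.Set String → List String → PySem.Set String × List String
  | _, [], vis, out => (vis, out)
  | f, c :: cs, vis, out =>
      if PySem.Set.contains vis c then pvTopoChildA adj f cs vis out
      else
        let p := pvTopoUtilA adj f c vis out
        pvTopoChildA adj f cs p.1 p.2
  termination_by f cs _ _ => (f, cs.length + 1)
end

mutual
def pvDfsA (adj : PySem.Dict String (List String)) :
    Nat → String → PySem.Set String → PySem.Set String
  | 0, _, vis => vis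
  | f + 1, v, vis => pvDfsChildA adj f (adj.getD v []) (PySem.Set.add vis v)
  termination_by f _ _ => (f, 0)

def pvDfsChildA (adj : PySem.Dict String (List String)) :
    Nat → List String → PySem.Set String → PySem.Set String
  | _, [], vis => vis
  | f, c :: cs, vis =>
      if PySem.Set.contains vis c then pvDfsChildA adj f cs vis
      else pvDfsChildA adj f cs (pvDfsA adj f c vis)
  termination_by f cs _ => (f, cs.length + 1)
end

-- while stack: u = stack.pop(); …  — pops from the right, i.e. walks stack.reverse
def pvPopA (adj : PySem.Dict String (List String)) (F : Nat) (start : String) :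
    List String → PySem.Set String → List (String × String) → List (String × String)
  | [], _, acc => acc
  | u :: rest, vis, acc =>
      if PySem.Set.contains vis u then pvPopA adj F start rest vis acc
      else pvPopA adj F start rest (pvDfsA adj F u vis) (acc ++ [(start, u)])

def airport_connections (airports : List String) (routes : List (List String)) (starting_airport : String) : List (String × String) :=
  let adj := pvAdjA routes
  let F := airports.length + 2 * routes.length + 2   -- fuel > any DFS depth on this input
  let p := airports.foldl
    (fun (s : PySem.Set String × List String) a =>
      if PySem.Set.contains s.1 a then s else pvTopoUtilA adj F a s.1 s.2)
    (PySem.Set.empty, [])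
  let vis := pvDfsA adj F starting_airport PySem.Set.empty
  pvPopA adj F starting_airport p.2.reverse vis []

-- ===== PORT B =====
def pvAdjB (routes : List (List String)) : PySem.Dict String (List String) :=
  routes.foldl (fun d r =>
    match r with
    | [u, v] => d.modify u [] (· ++ [v])          -- adj.setdefault(u, []).append(v)
    | _ => d) PySem.Dict.empty                    -- other lengths raise ValueError: outside Pre_

-- termination measure for the engine's frame stack (each frame: fuel, node, pending children)
def pvMu (T : Nat) (frames : List (Nat × String × List String)) : Nat :=
  (frames.map (fun fr => (T + 2) ^ fr.1 * (fr.2.2.length + 1))).sum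

-- used by the engine's decreasing_by: any adjacency list is at most the total adjacency size
theorem pvGetD_len_le (d : PySem.Dict String (List String)) (c : String) :
    (d.getD c []).length ≤ (d.values.map List.length).sum := by
  unfold PySem.Dict.getD PySem.Dict.get? PySem.Dict.values
  cases h : d.items.find? (fun p => p.1 == c) with
  | none => simp
  | some p =>
      have hmem := List.mem_of_find?_eq_some h
      have : p.2.length ∈ (d.items.map (fun x => x.2)).map List.length := by
        simp only [List.map_map, List.mem_map]
        exact ⟨p, hmem, rfl⟩
      simpa [h] using List.le_sum_of_mem this

-- iterative post-order DFS engine; frames carry a depth fuel only to make the loop a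
-- structural recursion (never exhausted for the fuel used at the top level)
def pvEngineB (adj : PySem.Dict String (List String)) :
    List (Nat × String × List String) → PySem.Set String → List String →
      PySem.Set String × List String
  | [], vis, out => (vis, out)
  | (_, v, []) :: rest, vis, out => pvEngineB adj rest vis (out ++ [v])
  | (f, v, c :: cs) :: rest, vis, out =>
      if PySem.Set.contains vis c then pvEngineB adj ((f, v, cs) :: rest) vis out
      else
        match f with
        | 0 => pvEngineB adj ((0, v, cs) :: rest) vis out   -- fuel guard; unreachable at the top level
        | g + 1 =>
            pvEngineB adj ((g, c, adj.getD c []) :: (g + 1, v, cs) :: rest)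
              (PySem.Set.add vis c) out
  termination_by frames _ _ => pvMu ((adj.values.map List.length).sum) frames
  decreasing_by
  all_goals simp [pvMu, pow_succ]
  have h := pvGetD_len_le adj c
  nlinarith [pow_pos (show 0 < (adj.values.map List.length).sum + 2 by omega) g]

def pvRunB (adj : PySem.Dict String (List String)) (F : Nat) (root : String)
    (vis : PySem.Set String) (out : List String) : PySem.Set String × List String :=
  pvEngineB adj [(F - 1, root, adj.getD root [])] (PySem.Set.add vis root) out

-- for u in reversed(order): …
def pvResB (adj : PySem.Dict String (List String)) (F : Nat) (start : String) :
    List String → PySem.Set String → List (String × String) → List (String × String)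
  | [], _, res => res
  | u :: rest, vis, res =>
      if PySem.Set.contains vis u then pvResB adj F start rest vis res
      else pvResB adj F start rest (pvRunB adj F u vis []).1 (res ++ [(start, u)])

def airport_connections_alt (airports : List String) (routes : List (List String)) (starting_airport : String) : List (String × String) :=
  let adj := pvAdjB routes
  let F := airports.length + 2 * routes.length + 2   -- fuel > any DFS depth on this input
  let p := airports.foldl
    (fun (s : PySem.Set String × List String) a =>
      if PySem.Set.contains s.1 a then s else pvRunB adj F a s.1 s.2)
    (PySem.Set.empty, [])
  let vis := (pvRunB adj F starting_airport PySem.Set.empty []).1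
  pvResB adj F starting_airport p.2.reverse vis []

-- ===== PRECONDITION & SPEC =====
-- Pre_ excludes routes that are not [u, v] pairs: there 'u, v = route' raises ValueError in both Pythons.
def Pre_airport_connections (airports : List String) (routes : List (List String)) (starting_airport : String) : Prop :=
  ∀ r ∈ routes, r.length = 2
instance (airports : List String) (routes : List (List String)) (starting_airport : String) : Decidable (Pre_airport_connections airports routes starting_airport) := by unfold Pre_airport_connections; infer_instance

def pvWitness_airport_connections : List String × List (List String) × String :=
  (["a", "b", "c"], [["a", "b"], ["b", "c"]], "b")

def Spec_airport_connections (airports : List String) (routes : List (List String)) (starting_airport : String) (out : List (String × String)) : Prop := out = airport_connections_alt airports routes starting_airport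
instance (airports : List String) (routes : List (List String)) (starting_airport : String) (out : List (String × String)) : Decidable (Spec_airport_connections airports routes starting_airport out) := by unfold Spec_airport_connections; infer_instance

-- ===== CLAIM (what is proved, stated in full; the proofs are below) =====
def Claim_equal_airport_connections : Prop := ∀ (airports : List String) (routes : List (List String)) (starting_airport : String), Dom_airport_connections airports routes starting_airport → Pre_airport_connections airports routes starting_airport → Spec_airport_connections airports routes starting_airport (airport_connections airports routes starting_airport)

-- ===== LEMMAS AND PROOFS =====

-- the first component of the topo-sort DFS state evolves exactly as A's plain reachability DFS
theorem pvChild_fst (adj : PySem.Dict String (List String)) :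
    ∀ (f : Nat) (cs : List String) (vis : PySem.Set String) (out : List String),
      (pvTopoChildA adj f cs vis out).1 = pvDfsChildA adj f cs vis := by
  intro f
  induction f with
  | zero =>
    intro cs
    induction cs with
    | nil => intro vis out; simp [pvTopoChildA, pvDfsChildA]
    | cons c cs ih =>
      intro vis out
      by_cases h : c ∈ vis
      · simp [pvTopoChildA, pvDfsChildA, h, ih]
      · simp [pvTopoChildA, pvDfsChildA, h, pvTopoUtilA, pvDfsA, ih]
  | succ g ihg =>
    intro cs
    induction cs with
    | nil => intro vis out; simp [pvTopoChildA, pvDfsChildA]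
    | cons c cs ih =>
      intro vis out
      by_cases h : c ∈ vis
      · simp [pvTopoChildA, pvDfsChildA, h, ih]
      · simp [pvTopoChildA, pvDfsChildA, h, pvTopoUtilA, pvDfsA, ihg, ih]

theorem pvUtil_fst (adj : PySem.Dict String (List String)) (f : Nat) (v : String)
    (vis : PySem.Set String) (out : List String) :
    (pvTopoUtilA adj f v vis out).1 = pvDfsA adj f v vis := by
  cases f with
  | zero => simp [pvTopoUtilA, pvDfsA]
  | succ g => simp [pvTopoUtilA, pvDfsA, pvChild_fst]

-- the engine simulates A's recursion: processing a frame (f, v, cs) runs A's child loop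
-- at fuel f and then emits v
theorem pvEngine_sim (adj : PySem.Dict String (List String)) :
    ∀ (f : Nat) (cs : List String) (v : String) (rest : List (Nat × String × List String))
      (vis : PySem.Set String) (out : List String),
      pvEngineB adj ((f, v, cs) :: rest) vis out
        = pvEngineB adj rest (pvTopoChildA adj f cs vis out).1
            ((pvTopoChildA adj f cs vis out).2 ++ [v]) := by
  intro f
  induction f with
  | zero =>
    intro cs
    induction cs with
    | nil => intro v rest vis out; simp [pvEngineB, pvTopoChildA]
    | cons c cs ih =>
      intro v rest vis out
      by_cases h : c ∈ vis
      · simp [pvEngineB, pvTopoChildA, h, ih]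
      · simp [pvEngineB, pvTopoChildA, h, pvTopoUtilA, ih]
  | succ g ihg =>
    intro cs
    induction cs with
    | nil => intro v rest vis out; simp [pvEngineB, pvTopoChildA]
    | cons c cs ih =>
      intro v rest vis out
      by_cases h : c ∈ vis
      · simp [pvEngineB, pvTopoChildA, h, ih]
      · rw [show pvEngineB adj ((g + 1, v, c :: cs) :: rest) vis out
              = pvEngineB adj ((g, c, adj.getD c []) :: (g + 1, v, cs) :: rest)
                  (PySem.Set.add vis c) out by simp [pvEngineB, h]]
        rw [ihg, ih]
        simp [pvTopoChildA, h, pvTopoUtilA]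

-- running the engine from a root = A's recursive topo_sort_util at positive fuel
theorem pvRun_eq (adj : PySem.Dict String (List String)) (g : Nat) (root : String)
    (vis : PySem.Set String) (out : List String) :
    pvRunB adj (g + 1) root vis out = pvTopoUtilA adj (g + 1) root vis out := by
  unfold pvRunB
  rw [show g + 1 - 1 = g from rfl, pvEngine_sim]
  simp [pvEngineB, pvTopoUtilA]

theorem pvRun_fst (adj : PySem.Dict String (List String)) (g : Nat) (root : String)
    (vis : PySem.Set String) :
    (pvRunB adj (g + 1) root vis []).1 = pvDfsA adj (g + 1) root vis := by
  rw [pvRun_eq, pvUtil_fst]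

-- the two adjacency builds produce the same dict
theorem pvAdjB_eq (routes : List (List String)) : pvAdjB routes = pvAdjA routes := rfl

-- the result loops agree
theorem pvRes_eq (adj : PySem.Dict String (List String)) (g : Nat) (start : String) :
    ∀ (l : List String) (vis : PySem.Set String) (acc : List (String × String)),
      pvResB adj (g + 1) start l vis acc = pvPopA adj (g + 1) start l vis acc := by
  intro l
  induction l with
  | nil => intro vis acc; simp [pvResB, pvPopA]
  | cons u rest ih =>
    intro vis acc
    by_cases h : u ∈ vis
    · simp [pvResB, pvPopA, h, ih]
    · simp [pvResB, pvPopA, h, pvRun_fst, ih]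

-- ===== VERDICT (by name: the statement is the Claim_ definition above) =====
theorem airport_connections_spec : Claim_equal_airport_connections := by
  intro airports routes starting_airport _ _
  unfold Spec_airport_connections airport_connections airport_connections_alt
  dsimp only
  rw [pvAdjB_eq]
  rw [show airports.length + 2 * routes.length + 2
      = (airports.length + 2 * routes.length + 1) + 1 from rfl]
  rw [show (fun (s : PySem.Set String × List String) a =>
        if s.1.contains a = true then s
        else pvRunB (pvAdjA routes) ((airports.length + 2 * routes.length + 1) + 1) a s.1 s.2)
      = (fun (s : PySem.Set String × List String) a =>
        if s.1.contains a = true then s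
        else pvTopoUtilA (pvAdjA routes) ((airports.length + 2 * routes.length + 1) + 1) a s.1 s.2)
      from funext fun s => funext fun a => by rw [pvRun_eq]]
  rw [pvRun_fst, pvRes_eq]
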